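-- pv_equiv track=rewrite | github.com/napxie/leetcode | src/面试题13. 机器人的运动范围/13.py | movingCount2
-- ===== SOURCE A (Python) =====
-- def movingCount2(m: int, n: int, k: int) -> int:
--     from collections import deque
--     def addDigit(a, b):
--         ans = 0
--         while a != 0:
--             ans += a % 10
--             a //= 10
--         while b != 0:
--             ans += b % 10
--             b //= 10
--         return ans
--     matrix = [[0 for _ in range(n)] for _ in range(m)]
--     matrix[0][0] = 1
--     temp = deque()
--     temp.append([0, 0])
--     res = 0
--     while temp:
--         x, y = temp.popleft()
--         res += 1
--         for x_bias, y_bias in [[0, 1], [0, -1], [1, 0], [-1, 0]]: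
--             new_x, new_y = x + x_bias, y + y_bias
--             if new_x < 0 or new_x > m - 1 or new_y < 0 or new_y > n - 1 or addDigit(new_x, new_y) > k or matrix[new_x][new_y] == 1:
--                 continue
--             matrix[new_x][new_y] = 1
--             temp.append([new_x, new_y])
--     return res
-- ===== SOURCE B (Python) =====
-- def movingCount2(m: int, n: int, k: int) -> int:
--     def digits(a):
--         s = 0
--         while a != 0:
--             s += a % 10
--             a //= 10
--         return s
--     reach = [[0] * n for _ in range(m)]
--     reach[0][0] = 1
--     changed = True
--     while changed:
--         changed = False
--         for i in range(m):
--             for j in range(n):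
--                 if reach[i][j] == 0 and digits(i) + digits(j) <= k:
--                     if (i > 0 and reach[i - 1][j] == 1) or \
--                        (j > 0 and reach[i][j - 1] == 1) or \
--                        (i < m - 1 and reach[i + 1][j] == 1) or \
--                        (j < n - 1 and reach[i][j + 1] == 1):
--                         reach[i][j] = 1
--                         changed = True
--     return sum(row.count(1) for row in reach)
-- ===== Notes on version B (the rewrite author's own statement) =====
-- stated objective: alternative
-- what changed: Replaced the deque-based BFS flood fill with a queue-free iterated raster-sweep fixpoint: repeatedly scan the grid marking any unmarked in-limit cell adjacent to a marked cell until a full sweep changes nothing, then count marked cells.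
import Mathlib
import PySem

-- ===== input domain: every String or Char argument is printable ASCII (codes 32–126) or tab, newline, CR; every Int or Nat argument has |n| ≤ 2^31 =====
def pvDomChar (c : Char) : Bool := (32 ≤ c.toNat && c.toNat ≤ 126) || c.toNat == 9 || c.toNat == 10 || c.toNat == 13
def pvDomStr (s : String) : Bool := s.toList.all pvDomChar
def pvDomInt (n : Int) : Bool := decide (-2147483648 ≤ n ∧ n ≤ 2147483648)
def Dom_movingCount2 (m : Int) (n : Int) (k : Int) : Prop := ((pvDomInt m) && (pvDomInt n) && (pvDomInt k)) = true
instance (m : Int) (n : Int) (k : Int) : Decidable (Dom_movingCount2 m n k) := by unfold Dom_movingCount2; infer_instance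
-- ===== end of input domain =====

-- B replaces A's deque BFS flood fill by an iterated raster-sweep fixpoint (no queue): repeated
-- full-grid sweeps mark any unmarked in-limit cell adjacent to a marked cell until a sweep changes
-- nothing; the return values are proved equal on m ≥ 1, n ≥ 1 (elsewhere both Pythons raise).

-- ===== PORT A =====

-- digit sum of a natural number (Python's `while a != 0: ans += a % 10; a //= 10`)
def dsN (a : Nat) : Nat :=
  if h : a = 0 then 0 else a % 10 + dsN (a / 10)
decreasing_by exact Nat.div_lt_self (Nat.pos_of_ne_zero h) (by norm_num)

-- A's addDigit(a, b); exact for 0 ≤ a, 0 ≤ b, which holds at every call site (bounds are checked first)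
def addDigit (a b : Int) : Int := (dsN a.toNat : Int) + (dsN b.toNat : Int)

-- matrix[i][j] read (all call sites are bounds-checked first, so the default is never the value read)
def getC (mat : List (List Int)) (i j : Nat) : Int := (mat.getD i []).getD j 0

-- matrix[i][j] = v (all call sites are in range, where List.set is Python's in-place assignment)
def setC (mat : List (List Int)) (i j : Nat) (v : Int) : List (List Int) :=
  mat.set i ((mat.getD i []).set j v)

-- the matrix is an m × n grid (shape invariant carried by both loops, needed for termination)
def Dims (m n : Int) (mat : List (List Int)) : Prop :=
  mat.length = m.toNat ∧ ∀ r ∈ mat, r.length = n.toNat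

-- the set of marked grid cells (used by the termination measures and by the proofs)
def markedF (m n : Int) (mat : List (List Int)) : Finset (Nat × Nat) :=
  (Finset.range m.toNat ×ˢ Finset.range n.toNat).filter (fun p => getC mat p.1 p.2 = 1)

lemma setC_dims (m n : Int) (mat : List (List Int)) (i j : Nat) (v : Int)
    (hd : Dims m n mat) : Dims m n (setC mat i j v) := by
  obtain ⟨h1, h2⟩ := hd
  by_cases hi : i < mat.length
  · refine ⟨by simpa [setC] using h1, ?_⟩
    intro r hr
    rcases List.mem_or_eq_of_mem_set hr with h | h
    · exact h2 r h
    · subst h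
      have hm : mat.getD i [] ∈ mat := by
        rw [List.getD_eq_getElem _ _ hi]; exact List.getElem_mem hi
      simpa using h2 _ hm
  · rw [setC, List.set_eq_of_length_le (le_of_not_gt hi)]
    exact ⟨h1, h2⟩

lemma getC_setC_ne (mat : List (List Int)) (i j : Nat) (v : Int) (i' j' : Nat)
    (h : ¬(i' = i ∧ j' = j)) : getC (setC mat i j v) i' j' = getC mat i' j' := by
  by_cases hi : i' = i
  · subst hi
    have hj : j' ≠ j := fun hj => h ⟨rfl, hj⟩
    by_cases hl : i' < mat.length
    · simp [getC, setC, List.getD, List.getElem?_set_self hl, List.getElem?_set_ne (Ne.symm hj)]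
    · rw [setC, List.set_eq_of_length_le (le_of_not_gt hl)]
  · simp [getC, setC, List.getD, List.getElem?_set_ne (Ne.symm hi)]

lemma getC_setC_self (mat : List (List Int)) (i j : Nat) (v : Int)
    (hi : i < mat.length) (hj : j < (mat.getD i []).length) :
    getC (setC mat i j v) i j = v := by
  have hj' : j < (mat[i]?.getD []).length := hj
  simp [getC, setC, List.getD, List.getElem?_set_self hi, List.getElem?_set_self hj']

lemma getC_one_lt (m n : Int) (mat : List (List Int)) (i j : Nat) (hd : Dims m n mat)
    (h : getC mat i j = 1) : i < m.toNat ∧ j < n.toNat := by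
  obtain ⟨h1, h2⟩ := hd
  by_cases hi : i < mat.length
  · have hm : mat.getD i [] ∈ mat := by
      rw [List.getD_eq_getElem _ _ hi]; exact List.getElem_mem hi
    have hlen : (mat.getD i []).length = n.toNat := h2 _ hm
    by_cases hj : j < (mat.getD i []).length
    · exact ⟨h1 ▸ hi, hlen ▸ hj⟩
    · rw [getC, List.getD_eq_default _ _ (le_of_not_gt hj)] at h; norm_num at h
  · rw [getC, List.getD_eq_default _ _ (le_of_not_gt hi)] at h
    simp [List.getD] at h
lemma getC_setC_iff (m n : Int) (mat : List (List Int)) (i j : Nat) (hd : Dims m n mat)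
    (hi : i < m.toNat) (hj : j < n.toNat) (i' j' : Nat) :
    getC (setC mat i j 1) i' j' = 1 ↔ (getC mat i' j' = 1 ∨ (i' = i ∧ j' = j)) := by
  by_cases h : i' = i ∧ j' = j
  · obtain ⟨rfl, rfl⟩ := h
    have hl : i' < mat.length := hd.1 ▸ hi
    have hm : mat.getD i' [] ∈ mat := by
      rw [List.getD_eq_getElem _ _ hl]; exact List.getElem_mem hl
    rw [getC_setC_self mat i' j' 1 hl (by rw [hd.2 _ hm]; exact hj)]
    simp
  · rw [getC_setC_ne mat i j 1 i' j' h]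
    simp [h]

lemma mem_markedF (m n : Int) (mat : List (List Int)) (p : Nat × Nat) :
    p ∈ markedF m n mat ↔ p.1 < m.toNat ∧ p.2 < n.toNat ∧ getC mat p.1 p.2 = 1 := by
  simp [markedF, Finset.mem_filter, Finset.mem_product, and_assoc]

lemma mem_markedF' (m n : Int) (mat : List (List Int)) (hd : Dims m n mat) (p : Nat × Nat) :
    p ∈ markedF m n mat ↔ getC mat p.1 p.2 = 1 := by
  rw [mem_markedF]
  constructor
  · exact fun h => h.2.2
  · intro h
    obtain ⟨h1, h2⟩ := getC_one_lt m n mat p.1 p.2 hd h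
    exact ⟨h1, h2, h⟩

lemma markedF_card_le (m n : Int) (mat : List (List Int)) :
    (markedF m n mat).card ≤ m.toNat * n.toNat := by
  calc (markedF m n mat).card ≤ (Finset.range m.toNat ×ˢ Finset.range n.toNat).card :=
        Finset.card_filter_le _ _
    _ = m.toNat * n.toNat := by simp

-- the freshly built matrix with the origin marked, and its shape
lemma dims_init (m n : Int) :
    Dims m n (setC (List.replicate m.toNat (List.replicate n.toNat (0 : Int))) 0 0 1) := by
  apply setC_dims
  constructor
  · simp
  · intro r hr
    simp [List.eq_of_mem_replicate hr]

def dirs : List (Int × Int) := [(0, 1), (0, -1), (1, 0), (-1, 0)]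

-- body of A's `for x_bias, y_bias in [...]` loop
def relaxStep (m n k x y : Int) (st : List (List Int) × List (Int × Int)) (d : Int × Int) :
    List (List Int) × List (Int × Int) :=
  if x + d.1 < 0 ∨ x + d.1 > m - 1 ∨ y + d.2 < 0 ∨ y + d.2 > n - 1 ∨
      addDigit (x + d.1) (y + d.2) > k ∨ getC st.1 (x + d.1).toNat (y + d.2).toNat = 1
  then st
  else (setC st.1 (x + d.1).toNat (y + d.2).toNat 1, st.2 ++ [(x + d.1, y + d.2)])

-- A's `for x_bias, y_bias in [...]: ...` (one whole pass over the four neighbours)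
def relax (m n k x y : Int) (st : List (List Int) × List (Int × Int)) :
    List (List Int) × List (Int × Int) :=
  dirs.foldl (relaxStep m n k x y) st

-- a cell that A's guard admits: inside the grid and within the digit-sum limit
def Adm (m n k : Int) (p : Int × Int) : Prop :=
  0 ≤ p.1 ∧ p.1 < m ∧ 0 ≤ p.2 ∧ p.2 < n ∧ addDigit p.1 p.2 ≤ k

-- everything one relax pass does, in one statement (drives termination and the BFS invariant)
lemma relaxFold_app (m n k x y : Int) :
    ∀ (ds : List (Int × Int)) (mat : List (List Int)) (q : List (Int × Int)),
      Dims m n mat →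
    ∀ st' : List (List Int) × List (Int × Int),
      List.foldl (relaxStep m n k x y) (mat, q) ds = st' →
    ∃ app : List (Int × Int),
      st'.2 = q ++ app ∧
      Dims m n st'.1 ∧
      (∀ i j : Nat, getC st'.1 i j = 1 ↔
        (getC mat i j = 1 ∨ ((i : Int), (j : Int)) ∈ app)) ∧
      app.Nodup ∧
      (∀ p ∈ app, getC mat p.1.toNat p.2.toNat ≠ 1 ∧ Adm m n k p ∧
        ∃ d ∈ ds, p = (x + d.1, y + d.2)) ∧
      (∀ d ∈ ds, Adm m n k (x + d.1, y + d.2) →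
        getC st'.1 (x + d.1).toNat (y + d.2).toNat = 1) := by
  intro ds
  induction ds with
  | nil =>
      intro mat q hd st' hst
      rw [List.foldl_nil] at hst
      subst hst
      exact ⟨[], by simp, hd, by simp, List.nodup_nil, by simp, by simp⟩
  | cons d ds ih =>
      intro mat q hd st' hst
      rw [List.foldl_cons] at hst
      by_cases hc : (x + d.1 < 0 ∨ x + d.1 > m - 1 ∨ y + d.2 < 0 ∨ y + d.2 > n - 1 ∨
          addDigit (x + d.1) (y + d.2) > k ∨ getC mat (x + d.1).toNat (y + d.2).toNat = 1)
      · rw [show relaxStep m n k x y (mat, q) d = (mat, q) from by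
          simp only [relaxStep]; rw [if_pos hc]] at hst
        obtain ⟨app, h1, h2, h3, h4, h5, h6⟩ := ih mat q hd st' hst
        refine ⟨app, h1, h2, h3, h4, ?_, ?_⟩
        · intro p hp
          obtain ⟨u1, u2, u3⟩ := h5 p hp
          obtain ⟨d', hd', he⟩ := u3
          exact ⟨u1, u2, d', List.mem_cons_of_mem _ hd', he⟩
        · intro d' hd' hadm
          rcases List.mem_cons.mp hd' with rfl | hmem
          · have hmk : getC mat (x + d'.1).toNat (y + d'.2).toNat = 1 := by
              obtain ⟨a1, a2, a3, a4, a5⟩ := hadm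
              rcases hc with h | h | h | h | h | h
              · omega
              · omega
              · omega
              · omega
              · exact absurd a5 (not_le.mpr h)
              · exact h
            exact (h3 _ _).mpr (Or.inl hmk)
          · exact h6 d' hmem hadm
      · push_neg at hc
        obtain ⟨b1, b2, b3, b4, b5, b6⟩ := hc
        rw [show relaxStep m n k x y (mat, q) d =
            (setC mat (x + d.1).toNat (y + d.2).toNat 1, q ++ [(x + d.1, y + d.2)]) from by
          simp only [relaxStep]; rw [if_neg]; push_neg
          exact ⟨b1, b2, b3, b4, b5, b6⟩] at hst
        have hiN : (x + d.1).toNat < m.toNat := by omega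
        have hjN : (y + d.2).toNat < n.toNat := by omega
        have hd' : Dims m n (setC mat (x + d.1).toNat (y + d.2).toNat 1) :=
          setC_dims m n mat _ _ 1 hd
        obtain ⟨app, h1, h2, h3, h4, h5, h6⟩ := ih _ _ hd' st' hst
        have hsetiff := getC_setC_iff m n mat (x + d.1).toNat (y + d.2).toNat hd hiN hjN
        have hself : getC (setC mat (x + d.1).toNat (y + d.2).toNat 1)
            (x + d.1).toNat (y + d.2).toNat = 1 :=
          (hsetiff _ _).mpr (Or.inr ⟨rfl, rfl⟩)
        have hcast : ∀ i j : Nat, (((i : Int), (j : Int)) = (x + d.1, y + d.2)) ↔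
            (i = (x + d.1).toNat ∧ j = (y + d.2).toNat) := by
          intro i j
          rw [Prod.ext_iff]
          constructor
          · rintro ⟨e1, e2⟩; constructor <;> omega
          · rintro ⟨e1, e2⟩; constructor <;> omega
        refine ⟨(x + d.1, y + d.2) :: app, ?_, h2, ?_, ?_, ?_, ?_⟩
        · rw [h1]; simp
        · intro i j
          rw [h3 i j, hsetiff i j, List.mem_cons, hcast i j]
          tauto
        · rw [List.nodup_cons]
          refine ⟨?_, h4⟩
          intro hmem
          exact (h5 _ hmem).1 hself
        · intro p hp0
          rcases List.mem_cons.mp hp0 with rfl | hp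
          · exact ⟨b6, ⟨b1, by omega, b3, by omega, b5⟩, d, List.mem_cons_self, rfl⟩
          · obtain ⟨u1, u2, u3⟩ := h5 p hp
            refine ⟨?_, u2, ?_⟩
            · intro hmk
              exact u1 ((hsetiff _ _).mpr (Or.inl hmk))
            · obtain ⟨d', hd', he⟩ := u3
              exact ⟨d', List.mem_cons_of_mem _ hd', he⟩
        · intro d' hd' hadm
          rcases List.mem_cons.mp hd' with rfl | hmem
          · exact (h3 _ _).mpr (Or.inl hself)
          · exact h6 d' hmem hadm

lemma relax_app (m n k x y : Int) (mat : List (List Int)) (q : List (Int × Int))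
    (hd : Dims m n mat) (st' : List (List Int) × List (Int × Int))
    (hst : relax m n k x y (mat, q) = st') :
    ∃ app : List (Int × Int),
      st'.2 = q ++ app ∧
      Dims m n st'.1 ∧
      (∀ i j : Nat, getC st'.1 i j = 1 ↔
        (getC mat i j = 1 ∨ ((i : Int), (j : Int)) ∈ app)) ∧
      app.Nodup ∧
      (∀ p ∈ app, getC mat p.1.toNat p.2.toNat ≠ 1 ∧ Adm m n k p ∧
        ∃ d ∈ dirs, p = (x + d.1, y + d.2)) ∧
      (∀ d ∈ dirs, Adm m n k (x + d.1, y + d.2) →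
        getC st'.1 (x + d.1).toNat (y + d.2).toNat = 1) :=
  relaxFold_app m n k x y dirs mat q hd st' hst

lemma relax_card (m n k x y : Int) (mat : List (List Int)) (q : List (Int × Int))
    (hd : Dims m n mat) (st' : List (List Int) × List (Int × Int))
    (hst : relax m n k x y (mat, q) = st') :
    ∃ a : Nat, (markedF m n st'.1).card = (markedF m n mat).card + a ∧
      st'.2.length = q.length + a := by
  obtain ⟨app, h1, h2, h3, h4, h5, h6⟩ := relax_app m n k x y mat q hd st' hst
  refine ⟨app.length, ?_, by rw [h1]; simp⟩
  have hnodupmap : (app.map (fun p => (p.1.toNat, p.2.toNat))).Nodup := by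
    refine h4.map_on ?_
    intro p hp p' hp' he
    obtain ⟨-, ⟨c1, -, c3, -, -⟩, -⟩ := h5 p hp
    obtain ⟨-, ⟨c1', -, c3', -, -⟩, -⟩ := h5 p' hp'
    rw [Prod.ext_iff] at he ⊢
    obtain ⟨e1, e2⟩ := he
    constructor <;> omega
  have hunion : markedF m n st'.1 =
      markedF m n mat ∪ (app.map (fun p => (p.1.toNat, p.2.toNat))).toFinset := by
    ext p
    rw [mem_markedF' m n _ h2, Finset.mem_union, mem_markedF' m n _ hd, h3 p.1 p.2,
      List.mem_toFinset, List.mem_map]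
    constructor
    · rintro (hm | hm)
      · exact Or.inl hm
      · exact Or.inr ⟨((p.1 : Int), (p.2 : Int)), hm, by simp⟩
    · rintro (hm | ⟨r, hr, he⟩)
      · exact Or.inl hm
      · right
        obtain ⟨-, ⟨c1, -, c3, -, -⟩, -⟩ := h5 r hr
        have : ((p.1 : Int), (p.2 : Int)) = r := by
          rw [Prod.ext_iff] at he ⊢
          obtain ⟨e1, e2⟩ := he
          constructor <;> simp at e1 e2 ⊢ <;> omega
        rwa [this]
  have hdisj : Disjoint (markedF m n mat) (app.map (fun p => (p.1.toNat, p.2.toNat))).toFinset := by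
    rw [Finset.disjoint_left]
    intro p hp hpa
    rw [List.mem_toFinset, List.mem_map] at hpa
    obtain ⟨r, hr, he⟩ := hpa
    rw [mem_markedF' m n _ hd] at hp
    obtain ⟨hu, -, -⟩ := h5 r hr
    rw [← he] at hp
    exact hu hp
  rw [hunion, Finset.card_union_of_disjoint hdisj, List.toFinset_card_of_nodup hnodupmap,
    List.length_map]

lemma relax_dims (m n k x y : Int) (mat : List (List Int)) (q : List (Int × Int))
    (hd : Dims m n mat) : Dims m n (relax m n k x y (mat, q)).1 :=
  (relax_app m n k x y mat q hd _ rfl).choose_spec.2.1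

lemma relax_measure (m n k x y : Int) (mat : List (List Int)) (q : List (Int × Int))
    (hd : Dims m n mat) (st' : List (List Int) × List (Int × Int))
    (hst : relax m n k x y (mat, q) = st') :
    5 * (m.toNat * n.toNat - (markedF m n st'.1).card) + st'.2.length <
    5 * (m.toNat * n.toNat - (markedF m n mat).card) + (q.length + 1) := by
  obtain ⟨a, hc, hl⟩ := relax_card m n k x y mat q hd st' hst
  have hle := markedF_card_le m n st'.1
  omega

-- A's `while temp:` loop; `h` carries the matrix shape (a totality guard only)
def bfsLoop (m n k : Int) (mat : List (List Int)) (q : List (Int × Int)) (res : Int)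
    (h : Dims m n mat) : Int :=
  match q with
  | [] => res
  | (x, y) :: rest =>
      bfsLoop m n k (relax m n k x y (mat, rest)).1 (relax m n k x y (mat, rest)).2 (res + 1)
        (relax_dims m n k x y mat rest h)
termination_by 5 * (m.toNat * n.toNat - (markedF m n mat).card) + q.length
decreasing_by exact relax_measure m n k x y mat rest h _ rfl

def movingCount2 (m : Int) (n : Int) (k : Int) : Int :=
  bfsLoop m n k (setC (List.replicate m.toNat (List.replicate n.toNat (0 : Int))) 0 0 1)
    [(0, 0)] 0 (dims_init m n)

-- ===== PORT B =====

-- body of B's inner `for j in range(n)` loop (`st.2` is B's `changed` flag)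
def sweepCell (m n k : Int) (st : List (List Int) × Bool) (i j : Nat) :
    List (List Int) × Bool :=
  if getC st.1 i j = 0 ∧ (dsN i + dsN j : Int) ≤ k ∧
      ((0 < i ∧ getC st.1 (i - 1) j = 1) ∨ (0 < j ∧ getC st.1 i (j - 1) = 1) ∨
       ((i : Int) < m - 1 ∧ getC st.1 (i + 1) j = 1) ∨ ((j : Int) < n - 1 ∧ getC st.1 i (j + 1) = 1))
  then (setC st.1 i j 1, true)
  else st

-- B's `for i in range(m)` body
def sweepRow (m n k : Int) (st : List (List Int) × Bool) (i : Nat) :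
    List (List Int) × Bool :=
  (List.range n.toNat).foldl (fun st j => sweepCell m n k st i j) st

-- one full pass of B's `while changed:` body (`changed` reset to false, then the two for loops)
def sweep (m n k : Int) (mat : List (List Int)) : List (List Int) × Bool :=
  (List.range m.toNat).foldl (fun st i => sweepRow m n k st i) (mat, false)

-- the condition of B's cell update, as a named predicate (used by the sweep lemmas)
def swCondP (m n k : Int) (mat : List (List Int)) (i j : Nat) : Prop :=
  getC mat i j = 0 ∧ (dsN i + dsN j : Int) ≤ k ∧
    ((0 < i ∧ getC mat (i - 1) j = 1) ∨ (0 < j ∧ getC mat i (j - 1) = 1) ∨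
     ((i : Int) < m - 1 ∧ getC mat (i + 1) j = 1) ∨ ((j : Int) < n - 1 ∧ getC mat i (j + 1) = 1))

lemma sweepCell_pos (m n k : Int) (st : List (List Int) × Bool) (i j : Nat)
    (h : swCondP m n k st.1 i j) : sweepCell m n k st i j = (setC st.1 i j 1, true) := by
  unfold swCondP at h
  simp only [sweepCell]
  rw [if_pos h]

lemma sweepCell_neg (m n k : Int) (st : List (List Int) × Bool) (i j : Nat)
    (h : ¬ swCondP m n k st.1 i j) : sweepCell m n k st i j = st := by
  unfold swCondP at h
  simp only [sweepCell]
  rw [if_neg h]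

-- hypothesis shape for transferring a reachability property R through a sweep
def HRhyp (m n k : Int) (R : Nat → Nat → Prop) : Prop :=
  ∀ w i j, Dims m n w → i < m.toNat → j < n.toNat →
    (∀ a b, getC w a b = 1 → R a b) → swCondP m n k w i j → R i j

-- everything a (partial) sweep does, relative to the set Cov of cells it has visited
def SwInv (m n k : Int) (Cov : Nat → Nat → Prop) (st st' : List (List Int) × Bool) : Prop :=
  (Dims m n st.1 → Dims m n st'.1) ∧
  (∀ i j, getC st.1 i j = 1 → getC st'.1 i j = 1) ∧
  (Dims m n st.1 → ∀ i j, getC st'.1 i j = getC st.1 i j ∨ getC st'.1 i j = 1) ∧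
  (st.2 = true → st'.2 = true) ∧
  (Dims m n st.1 → (st'.1 = st.1 ∧ st'.2 = st.2) ∨
    (st'.2 = true ∧ (markedF m n st.1).card < (markedF m n st'.1).card)) ∧
  (st'.2 = false → st'.1 = st.1 ∧ ∀ i j, Cov i j → ¬ swCondP m n k st.1 i j) ∧
  (Dims m n st.1 → ∀ R : Nat → Nat → Prop, HRhyp m n k R →
    (∀ a b, getC st.1 a b = 1 → R a b) → ∀ a b, getC st'.1 a b = 1 → R a b)

lemma swInv_weaken (m n k : Int) (Cov Cov' : Nat → Nat → Prop)
    (st st' : List (List Int) × Bool) (h : SwInv m n k Cov st st')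
    (hw : ∀ a b, Cov' a b → Cov a b) : SwInv m n k Cov' st st' := by
  obtain ⟨c1, c2, c3, c4, c5, c6, c7⟩ := h
  exact ⟨c1, c2, c3, c4, c5,
    fun hf => ⟨(c6 hf).1, fun i j hc => (c6 hf).2 i j (hw i j hc)⟩, c7⟩

lemma swInv_refl (m n k : Int) (Cov : Nat → Nat → Prop) (st : List (List Int) × Bool)
    (hcov : ∀ a b, ¬ Cov a b) : SwInv m n k Cov st st := by
  refine ⟨id, fun _ _ h => h, fun _ _ _ => Or.inl rfl, id, fun _ => Or.inl ⟨rfl, rfl⟩,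
    fun _ => ⟨rfl, fun i j hc => absurd hc (hcov i j)⟩,
    fun _ _ _ hs => hs⟩

lemma swInv_trans (m n k : Int) (C1 C2 : Nat → Nat → Prop) (st st' st'' : List (List Int) × Bool)
    (h1 : SwInv m n k C1 st st') (h2 : SwInv m n k C2 st' st'') :
    SwInv m n k (fun a b => C1 a b ∨ C2 a b) st st'' := by
  obtain ⟨a1, a2, a3, a4, a5, a6, a7⟩ := h1
  obtain ⟨b1, b2, b3, b4, b5, b6, b7⟩ := h2
  refine ⟨fun hd => b1 (a1 hd), fun i j h => b2 i j (a2 i j h), ?_, fun h => b4 (a4 h), ?_, ?_, ?_⟩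
  · intro hd i j
    rcases b3 (a1 hd) i j with h | h
    · rw [h]; exact a3 hd i j
    · exact Or.inr h
  · intro hd
    rcases a5 hd with ⟨e1, e2⟩ | ⟨hf, hlt⟩
    · rcases b5 (a1 hd) with ⟨f1, f2⟩ | ⟨hf', hlt'⟩
      · exact Or.inl ⟨f1.trans e1, f2.trans e2⟩
      · exact Or.inr ⟨hf', by rwa [e1] at hlt'⟩
    · rcases b5 (a1 hd) with ⟨f1, f2⟩ | ⟨hf', hlt'⟩
      · exact Or.inr ⟨by rw [f2]; exact hf, by rwa [f1]⟩
      · exact Or.inr ⟨hf', hlt.trans hlt'⟩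
  · intro hf
    have hf' : st'.2 = false := by
      cases hflag : st'.2
      · rfl
      · rw [b4 hflag] at hf; exact absurd hf (by simp)
    obtain ⟨e1, e2⟩ := a6 hf'
    obtain ⟨f1, f2⟩ := b6 hf
    refine ⟨f1.trans e1, ?_⟩
    intro i j hc
    rcases hc with hc | hc
    · exact e2 i j hc
    · rw [← e1]; exact f2 i j hc
  · intro hd R hR hs
    exact b7 (a1 hd) R hR (a7 hd R hR hs)

lemma swInv_cell (m n k : Int) (st : List (List Int) × Bool) (i j : Nat)
    (hi : i < m.toNat) (hj : j < n.toNat) :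
    SwInv m n k (fun a b => a = i ∧ b = j) st (sweepCell m n k st i j) := by
  by_cases h : swCondP m n k st.1 i j
  · rw [sweepCell_pos m n k st i j h]
    have h0 : getC st.1 i j = 0 := h.1
    refine ⟨fun hd => setC_dims m n st.1 i j 1 hd, ?_, ?_, fun _ => rfl, ?_, ?_, ?_⟩
    · intro a b hab
      have hne : ¬(a = i ∧ b = j) := by
        rintro ⟨rfl, rfl⟩; rw [h0] at hab; norm_num at hab
      rw [getC_setC_ne st.1 i j 1 a b hne]
      exact hab
    · intro hd a b
      by_cases hab : a = i ∧ b = j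
      · obtain ⟨rfl, rfl⟩ := hab
        exact Or.inr ((getC_setC_iff m n st.1 a b hd hi hj a b).mpr (Or.inr ⟨rfl, rfl⟩))
      · rw [getC_setC_ne st.1 i j 1 a b hab]; exact Or.inl rfl
    · intro hd
      refine Or.inr ⟨rfl, ?_⟩
      apply Finset.card_lt_card
      constructor
      · intro p hp
        rw [mem_markedF' m n _ hd] at hp
        rw [mem_markedF' m n _ (setC_dims m n st.1 i j 1 hd)]
        have hne : ¬(p.1 = i ∧ p.2 = j) := by
          rintro ⟨e1, e2⟩; rw [← e1, ← e2, hp] at h0; norm_num at h0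
        rw [getC_setC_ne st.1 i j 1 p.1 p.2 hne]
        exact hp
      · intro hsub
        have hmem : (i, j) ∈ markedF m n (setC st.1 i j 1) := by
          rw [mem_markedF' m n _ (setC_dims m n st.1 i j 1 hd)]
          exact (getC_setC_iff m n st.1 i j hd hi hj i j).mpr (Or.inr ⟨rfl, rfl⟩)
        have := hsub hmem
        rw [mem_markedF' m n _ hd] at this
        simp only at this
        rw [h0] at this; norm_num at this
    · intro hf; exact absurd hf (by simp)
    · intro hd R hR hs a b hab
      by_cases he : a = i ∧ b = j
      · obtain ⟨rfl, rfl⟩ := he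
        exact hR st.1 a b hd hi hj hs h
      · rw [getC_setC_ne st.1 i j 1 a b he] at hab
        exact hs a b hab
  · rw [sweepCell_neg m n k st i j h]
    refine ⟨id, fun _ _ hx => hx, fun _ _ _ => Or.inl rfl, id, fun _ => Or.inl ⟨rfl, rfl⟩,
      fun _ => ⟨rfl, ?_⟩, fun _ _ _ hs => hs⟩
    rintro a b ⟨rfl, rfl⟩
    exact h

lemma swInv_row (m n k : Int) (i : Nat) (hi : i < m.toNat) :
    ∀ (js : List Nat), (∀ j ∈ js, j < n.toNat) → ∀ st,
      SwInv m n k (fun a b => a = i ∧ b ∈ js) st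
        (js.foldl (fun st j => sweepCell m n k st i j) st) := by
  intro js
  induction js with
  | nil =>
      intro _ st
      exact swInv_refl m n k _ st (by simp)
  | cons j js ihj =>
      intro hjs st
      simp only [List.foldl_cons]
      have h1 := swInv_cell m n k st i j hi (hjs j (by simp))
      have h2 := ihj (fun j' hj' => hjs j' (List.mem_cons_of_mem _ hj')) (sweepCell m n k st i j)
      refine swInv_weaken m n k _ _ _ _ (swInv_trans m n k _ _ _ _ _ h1 h2) ?_
      rintro a b ⟨rfl, hb⟩
      rcases List.mem_cons.mp hb with rfl | hb
      · exact Or.inl ⟨rfl, rfl⟩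
      · exact Or.inr ⟨rfl, hb⟩

lemma swInv_sweep (m n k : Int) (mat : List (List Int)) :
    SwInv m n k (fun a b => a < m.toNat ∧ b < n.toNat) (mat, false) (sweep m n k mat) := by
  have main : ∀ (is : List Nat), (∀ i ∈ is, i < m.toNat) → ∀ st,
      SwInv m n k (fun a b => a ∈ is ∧ b < n.toNat) st
        (is.foldl (fun st i => sweepRow m n k st i) st) := by
    intro is
    induction is with
    | nil =>
        intro _ st
        exact swInv_refl m n k _ st (by simp)
    | cons i is ihi =>
        intro his st
        simp only [List.foldl_cons]
        have h1 : SwInv m n k (fun a b => a = i ∧ b < n.toNat) st (sweepRow m n k st i) := by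
          have := swInv_row m n k i (his i (by simp)) (List.range n.toNat)
            (fun j hj => List.mem_range.mp hj) st
          refine swInv_weaken m n k _ _ _ _ this ?_
          rintro a b ⟨rfl, hb⟩
          exact ⟨rfl, List.mem_range.mpr hb⟩
        have h2 := ihi (fun i' hi' => his i' (List.mem_cons_of_mem _ hi')) (sweepRow m n k st i)
        refine swInv_weaken m n k _ _ _ _ (swInv_trans m n k _ _ _ _ _ h1 h2) ?_
        rintro a b ⟨ha, hb⟩
        rcases List.mem_cons.mp ha with rfl | ha
        · exact Or.inl ⟨rfl, hb⟩
        · exact Or.inr ⟨ha, hb⟩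
  have := main (List.range m.toNat) (fun i hi => List.mem_range.mp hi) (mat, false)
  refine swInv_weaken m n k _ _ _ _ this ?_
  rintro a b ⟨ha, hb⟩
  exact ⟨List.mem_range.mpr ha, hb⟩

lemma sweep_dims (m n k : Int) (mat : List (List Int)) (hd : Dims m n mat) :
    Dims m n (sweep m n k mat).1 :=
  (swInv_sweep m n k mat).1 hd

lemma sweep_measure (m n k : Int) (mat : List (List Int)) (hd : Dims m n mat)
    (hc : (sweep m n k mat).2 = true) :
    m.toNat * n.toNat - (markedF m n (sweep m n k mat).1).card <
      m.toNat * n.toNat - (markedF m n mat).card := by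
  have h5 := (swInv_sweep m n k mat).2.2.2.2.1 hd
  rcases h5 with ⟨-, e2⟩ | ⟨-, hlt⟩
  · rw [hc] at e2; exact absurd e2.symm (by simp)
  · have hlt' : (markedF m n mat).card < (markedF m n (sweep m n k mat).1).card := hlt
    have hle := markedF_card_le m n (sweep m n k mat).1
    omega

-- B's `while changed:` loop; `h` carries the matrix shape (a totality guard only)
def swLoop (m n k : Int) (mat : List (List Int)) (h : Dims m n mat) : List (List Int) :=
  if hc : (sweep m n k mat).2 = true then
    swLoop m n k (sweep m n k mat).1 (sweep_dims m n k mat h)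
  else (sweep m n k mat).1
termination_by m.toNat * n.toNat - (markedF m n mat).card
decreasing_by exact sweep_measure m n k mat h hc

def movingCount2_alt (m : Int) (n : Int) (k : Int) : Int :=
  let matF := swLoop m n k
    (setC (List.replicate m.toNat (List.replicate n.toNat (0 : Int))) 0 0 1) (dims_init m n)
  ((matF.map (fun r => r.count 1)).sum : Int)

-- ===== PRECONDITION & SPEC =====
-- Pre_ excludes exactly m ≤ 0 or n ≤ 0, where the Python A (and B alike) raises IndexError on matrix[0][0].
def Pre_movingCount2 (m : Int) (n : Int) (k : Int) : Prop := 1 ≤ m ∧ 1 ≤ n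
instance (m : Int) (n : Int) (k : Int) : Decidable (Pre_movingCount2 m n k) := by
  unfold Pre_movingCount2; infer_instance
def pvWitness_movingCount2 : Int × Int × Int := (3, 4, 5)

def Spec_movingCount2 (m : Int) (n : Int) (k : Int) (out : Int) : Prop := out = movingCount2_alt m n k
instance (m : Int) (n : Int) (k : Int) (out : Int) : Decidable (Spec_movingCount2 m n k out) := by unfold Spec_movingCount2; infer_instance

-- ===== CLAIM (what is proved, stated in full; the proofs are below) =====
def Claim_equal_movingCount2 : Prop := ∀ (m : Int) (n : Int) (k : Int), Dom_movingCount2 m n k → Pre_movingCount2 m n k → Spec_movingCount2 m n k (movingCount2 m n k)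

-- ===== LEMMAS AND PROOFS =====

-- cells the robot can reach: the origin (counted unconditionally by both programs), closed
-- under in-grid single steps into cells within the digit-sum limit
inductive ReachN (m n k : Int) : Nat → Nat → Prop where
  | origin : ReachN m n k 0 0
  | right {i j : Nat} : ReachN m n k i j → ((j : Int) + 1 < n) →
      ((dsN i : Int) + dsN (j + 1) ≤ k) → ReachN m n k i (j + 1)
  | left {i j : Nat} : ReachN m n k i (j + 1) → ((dsN i : Int) + dsN j ≤ k) → ReachN m n k i j
  | down {i j : Nat} : ReachN m n k i j → ((i : Int) + 1 < m) →
      ((dsN (i + 1) : Int) + dsN j ≤ k) → ReachN m n k (i + 1) j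
  | up {i j : Nat} : ReachN m n k (i + 1) j → ((dsN i : Int) + dsN j ≤ k) → ReachN m n k i j

lemma reach_lt {m n k : Int} (hm : 1 ≤ m) (hn : 1 ≤ n) {i j : Nat} (h : ReachN m n k i j) :
    i < m.toNat ∧ j < n.toNat := by
  induction h with
  | origin => omega
  | right hr hb hreg ih => omega
  | left hr hreg ih => omega
  | down hr hb hreg ih => omega
  | up hr hreg ih => omega

lemma addDigit_cast (i j : Nat) : addDigit (i : Int) (j : Int) = (dsN i : Int) + dsN j := by
  simp [addDigit]

-- a cell B's sweep condition fires on, next to a reachable set, is itself reachable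
lemma hr_reach {m n k : Int} (hm : 1 ≤ m) (hn : 1 ≤ n) : HRhyp m n k (ReachN m n k) := by
  intro w i j hd hi hj hsound hcond
  obtain ⟨h0, hreg, hnb⟩ := hcond
  rcases hnb with ⟨hipos, hmk⟩ | ⟨hjpos, hmk⟩ | ⟨hlt, hmk⟩ | ⟨hlt, hmk⟩
  · have hr := hsound _ _ hmk
    have he : i - 1 + 1 = i := by omega
    rw [← he]
    exact ReachN.down hr (by omega) (by rw [he]; exact hreg)
  · have hr := hsound _ _ hmk
    have he : j - 1 + 1 = j := by omega
    rw [← he]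
    exact ReachN.right hr (by omega) (by rw [he]; exact hreg)
  · exact ReachN.up (hsound _ _ hmk) hreg
  · exact ReachN.left (hsound _ _ hmk) hreg

-- the BFS loop invariant
def InvA (m n k : Int) (mat : List (List Int)) (q : List (Int × Int)) (res : Int) : Prop :=
  Dims m n mat ∧
  getC mat 0 0 = 1 ∧
  (∀ i j : Nat, getC mat i j = 1 → ReachN m n k i j) ∧
  (∀ p ∈ q, 0 ≤ p.1 ∧ 0 ≤ p.2) ∧
  (∀ p ∈ q, getC mat p.1.toNat p.2.toNat = 1) ∧
  q.Nodup ∧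
  (∀ i j : Nat, getC mat i j = 1 → ((i : Int), (j : Int)) ∉ q →
    ∀ d ∈ dirs, Adm m n k ((i : Int) + d.1, (j : Int) + d.2) →
      getC mat ((i : Int) + d.1).toNat ((j : Int) + d.2).toNat = 1) ∧
  res + q.length = ((markedF m n mat).card : Int)

-- a fully relaxed marked set contains every reachable cell
lemma closed_marked_A {m n k : Int} (hm : 1 ≤ m) (hn : 1 ≤ n) (mat : List (List Int))
    (horig : getC mat 0 0 = 1)
    (hclosed : ∀ i j : Nat, getC mat i j = 1 →
      ∀ d ∈ dirs, Adm m n k ((i : Int) + d.1, (j : Int) + d.2) →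
        getC mat ((i : Int) + d.1).toNat ((j : Int) + d.2).toNat = 1) :
    ∀ i j : Nat, ReachN m n k i j → getC mat i j = 1 := by
  have hcl : ∀ (i j : Nat) (di dj : Int), getC mat i j = 1 → (di, dj) ∈ dirs →
      0 ≤ (i : Int) + di → (i : Int) + di < m → 0 ≤ (j : Int) + dj → (j : Int) + dj < n →
      addDigit ((i : Int) + di) ((j : Int) + dj) ≤ k →
      getC mat ((i : Int) + di).toNat ((j : Int) + dj).toNat = 1 := by
    intro i j di dj hmk hdm h1 h2 h3 h4 h5
    exact hclosed i j hmk (di, dj) hdm ⟨h1, h2, h3, h4, h5⟩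
  intro i j hr
  induction hr with
  | origin => exact horig
  | @right i j hr hb hreg ih =>
      have hlt := reach_lt hm hn hr
      have hadd : addDigit ((i : Int) + 0) ((j : Int) + 1) ≤ k := by
        have e1 : (i : Int) + 0 = ((i : Nat) : Int) := by ring
        have e2 : (j : Int) + 1 = (((j + 1 : Nat)) : Int) := by push_cast; ring
        rw [e1, e2, addDigit_cast]; exact hreg
      have := hcl i j 0 1 ih (by simp [dirs]) (by omega) (by omega) (by omega) (by omega) hadd
      have e1 : ((i : Int) + 0).toNat = i := by omega
      have e2 : ((j : Int) + 1).toNat = j + 1 := by omega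
      rwa [e1, e2] at this
  | @left i j hr hreg ih =>
      have hlt := reach_lt hm hn hr
      have hadd : addDigit (((j + 1 : Nat) : Int) * 0 + (i : Int) + 0) (((j + 1 : Nat) : Int) + (-1)) ≤ k := by
        have e1 : ((j + 1 : Nat) : Int) * 0 + (i : Int) + 0 = ((i : Nat) : Int) := by ring
        have e2 : ((j + 1 : Nat) : Int) + (-1) = ((j : Nat) : Int) := by push_cast; ring
        rw [e1, e2, addDigit_cast]; exact hreg
      have := hcl i (j + 1) 0 (-1) ih (by simp [dirs]) (by omega) (by omega) (by omega)
        (by omega) (by simpa using hadd)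
      have e1 : ((i : Int) + 0).toNat = i := by omega
      have e2 : (((j + 1 : Nat) : Int) + (-1)).toNat = j := by omega
      rwa [e1, e2] at this
  | @down i j hr hb hreg ih =>
      have hlt := reach_lt hm hn hr
      have hadd : addDigit ((i : Int) + 1) ((j : Int) + 0) ≤ k := by
        have e1 : (i : Int) + 1 = (((i + 1 : Nat)) : Int) := by push_cast; ring
        have e2 : (j : Int) + 0 = ((j : Nat) : Int) := by ring
        rw [e1, e2, addDigit_cast]; exact hreg
      have := hcl i j 1 0 ih (by simp [dirs]) (by omega) (by omega) (by omega) (by omega) hadd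
      have e1 : ((i : Int) + 1).toNat = i + 1 := by omega
      have e2 : ((j : Int) + 0).toNat = j := by omega
      rwa [e1, e2] at this
  | @up i j hr hreg ih =>
      have hlt := reach_lt hm hn hr
      have hadd : addDigit (((i + 1 : Nat) : Int) + (-1)) ((j : Int) + 0) ≤ k := by
        have e1 : ((i + 1 : Nat) : Int) + (-1) = ((i : Nat) : Int) := by push_cast; ring
        have e2 : (j : Int) + 0 = ((j : Nat) : Int) := by ring
        rw [e1, e2, addDigit_cast]; exact hreg
      have := hcl (i + 1) j (-1) 0 ih (by simp [dirs]) (by omega) (by omega) (by omega)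
        (by omega) hadd
      have e1 : (((i + 1 : Nat) : Int) + (-1)).toNat = i := by omega
      have e2 : ((j : Int) + 0).toNat = j := by omega
      rwa [e1, e2] at this

-- the BFS loop computes |marked set of a fully relaxed matrix|, and that set is the reachable set
lemma bfs_master {m n k : Int} (hm : 1 ≤ m) (hn : 1 ≤ n) :
    ∀ (mat : List (List Int)) (q : List (Int × Int)) (res : Int) (h : Dims m n mat),
      InvA m n k mat q res →
      ∃ matF, Dims m n matF ∧ (∀ i j : Nat, getC matF i j = 1 ↔ ReachN m n k i j) ∧
        bfsLoop m n k mat q res h = ((markedF m n matF).card : Int) := by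
  refine bfsLoop.induct m n k
    (fun mat q res h => InvA m n k mat q res →
      ∃ matF, Dims m n matF ∧ (∀ i j : Nat, getC matF i j = 1 ↔ ReachN m n k i j) ∧
        bfsLoop m n k mat q res h = ((markedF m n matF).card : Int)) ?_ ?_
  · intro mat res h inv
    obtain ⟨hd, horig, hsound, hqnn, hqmk, hqnd, hrel, hcount⟩ := inv
    refine ⟨mat, hd, ?_, ?_⟩
    · intro i j
      exact ⟨hsound i j,
        closed_marked_A hm hn mat horig (fun i j hmk => hrel i j hmk (by simp)) i j⟩
    · simp only [bfsLoop]
      simpa using hcount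
  · intro mat res h x y rest ih inv
    obtain ⟨hd, horig, hsound, hqnn, hqmk, hqnd, hrel, hcount⟩ := inv
    have hx : 0 ≤ x ∧ 0 ≤ y := by simpa using hqnn (x, y) (by simp)
    have hxy_mk : getC mat x.toNat y.toNat = 1 := by simpa using hqmk (x, y) (by simp)
    obtain ⟨st2, hrx⟩ : ∃ st2, relax m n k x y (mat, rest) = st2 := ⟨_, rfl⟩
    obtain ⟨app, h1, h2, h3, h4, h5, h6⟩ := relax_app m n k x y mat rest hd st2 hrx
    obtain ⟨a, hca, hla⟩ := relax_card m n k x y mat rest hd st2 hrx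
    simp only [bfsLoop]
    apply ih
    rw [InvA, hrx, h1]
    have hrxy : ReachN m n k x.toNat y.toNat := hsound _ _ hxy_mk
    refine ⟨h2, (h3 0 0).mpr (Or.inl horig), ?_, ?_, ?_, ?_, ?_, ?_⟩
    · -- soundness of new marks
      intro i j hmk
      rcases (h3 i j).mp hmk with hold | happ
      · exact hsound i j hold
      · obtain ⟨hunmk, hadm, d, hdm, he⟩ := h5 _ happ
        obtain ⟨ha1, ha2, ha3, ha4, ha5⟩ := hadm
        rw [Prod.ext_iff] at he
        obtain ⟨he1, he2⟩ := he
        rw [addDigit_cast] at ha5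
        simp only [dirs, List.mem_cons, List.not_mem_nil, or_false] at hdm
        simp only at he1 he2 ha1 ha2 ha3 ha4
        rcases hdm with rfl | rfl | rfl | rfl
        · simp only at he1 he2
          have ei : i = x.toNat := by omega
          have ej : j = y.toNat + 1 := by omega
          subst ei; subst ej
          exact ReachN.right hrxy (by omega) ha5
        · simp only at he1 he2
          have ei : i = x.toNat := by omega
          have ey : y.toNat = j + 1 := by omega
          subst ei
          refine ReachN.left ?_ ha5
          rw [← ey]
          exact hrxy
        · simp only at he1 he2
          have ei : i = x.toNat + 1 := by omega
          have ej : j = y.toNat := by omega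
          subst ei; subst ej
          exact ReachN.down hrxy (by omega) ha5
        · simp only at he1 he2
          have ex : x.toNat = i + 1 := by omega
          have ej : j = y.toNat := by omega
          subst ej
          refine ReachN.up ?_ ha5
          rw [← ex]
          exact hrxy
    · -- queue coords nonnegative
      intro p hp
      rcases List.mem_append.mp hp with hp | hp
      · exact hqnn p (List.mem_cons_of_mem _ hp)
      · obtain ⟨-, ⟨c1, -, c3, -, -⟩, -⟩ := h5 p hp
        exact ⟨c1, c3⟩
    · -- queue cells marked
      intro p hp
      rcases List.mem_append.mp hp with hp | hp
      · exact (h3 _ _).mpr (Or.inl (hqmk p (List.mem_cons_of_mem _ hp)))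
      · obtain ⟨-, ⟨c1, -, c3, -, -⟩, -⟩ := h5 p hp
        have hpe : ((p.1.toNat : Int), (p.2.toNat : Int)) = p := by
          rw [Prod.ext_iff]
          constructor <;> simp <;> omega
        refine (h3 _ _).mpr (Or.inr ?_)
        rw [hpe]
        exact hp
    · -- no duplicates
      rw [List.nodup_append]
      refine ⟨(List.nodup_cons.mp hqnd).2, h4, ?_⟩
      intro p hp p' hp' he
      obtain ⟨hunmk, -, -⟩ := h5 p' hp'
      exact hunmk (he ▸ hqmk p (List.mem_cons_of_mem _ hp))
    · -- popped cells stay relaxed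
      intro i j hmk hnotin d hdm hadm
      rcases (h3 i j).mp hmk with hold | happ
      · by_cases hxy : ((i : Int), (j : Int)) = (x, y)
        · rw [Prod.ext_iff] at hxy
          obtain ⟨ex, ey⟩ := hxy
          simp only at ex ey
          rw [ex, ey]
          exact h6 d hdm (by rw [← ex, ← ey]; exact hadm)
        · have hnotq : ((i : Int), (j : Int)) ∉ (x, y) :: rest := by
            intro hmem
            rcases List.mem_cons.mp hmem with he | hmem2
            · exact hxy he
            · exact hnotin (List.mem_append.mpr (Or.inl hmem2))
          exact (h3 _ _).mpr (Or.inl (hrel i j hold hnotq d hdm hadm))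
      · exact absurd (List.mem_append.mpr (Or.inr happ)) hnotin
    · -- count
      have hla' : (rest ++ app).length = rest.length + a := by rw [← h1]; exact hla
      simp only [List.length_cons] at hcount
      rw [hca]
      simp only [hla']
      push_cast
      push_cast at hcount
      omega

-- B's loop invariant
def InvB (m n k : Int) (mat : List (List Int)) : Prop :=
  getC mat 0 0 = 1 ∧
  (∀ i j : Nat, getC mat i j = 1 → ReachN m n k i j) ∧
  (∀ i j : Nat, getC mat i j = 0 ∨ getC mat i j = 1)

-- a stable, sound, origin-marked matrix contains every reachable cell
lemma closed_marked_B {m n k : Int} (hm : 1 ≤ m) (hn : 1 ≤ n) (mat : List (List Int))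
    (horig : getC mat 0 0 = 1) (hzo : ∀ i j : Nat, getC mat i j = 0 ∨ getC mat i j = 1)
    (hcl : ∀ i j : Nat, i < m.toNat → j < n.toNat → ¬ swCondP m n k mat i j) :
    ∀ i j : Nat, ReachN m n k i j → getC mat i j = 1 := by
  intro i j hr
  induction hr with
  | origin => exact horig
  | @right i j hr hb hreg ih =>
      have hlt := reach_lt hm hn hr
      rcases hzo i (j + 1) with h0 | h1
      · exact absurd ⟨h0, hreg, Or.inr (Or.inl ⟨by omega, by simpa using ih⟩)⟩
          (hcl i (j + 1) (by omega) (by omega))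
      · exact h1
  | @left i j hr hreg ih =>
      have hlt := reach_lt hm hn hr
      rcases hzo i j with h0 | h1
      · exact absurd ⟨h0, hreg, Or.inr (Or.inr (Or.inr ⟨by omega, by simpa using ih⟩))⟩
          (hcl i j (by omega) (by omega))
      · exact h1
  | @down i j hr hb hreg ih =>
      have hlt := reach_lt hm hn hr
      rcases hzo (i + 1) j with h0 | h1
      · exact absurd ⟨h0, hreg, Or.inl ⟨by omega, by simpa using ih⟩⟩
          (hcl (i + 1) j (by omega) (by omega))
      · exact h1
  | @up i j hr hreg ih =>
      have hlt := reach_lt hm hn hr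
      rcases hzo i j with h0 | h1
      · exact absurd ⟨h0, hreg, Or.inr (Or.inr (Or.inl ⟨by omega, by simpa using ih⟩))⟩
          (hcl i j (by omega) (by omega))
      · exact h1

-- the sweep loop reaches a stable matrix whose marked set is the reachable set
lemma sw_master {m n k : Int} (hm : 1 ≤ m) (hn : 1 ≤ n) :
    ∀ (mat : List (List Int)) (h : Dims m n mat), InvB m n k mat →
      Dims m n (swLoop m n k mat h) ∧
      (∀ i j : Nat, getC (swLoop m n k mat h) i j = 1 ↔ ReachN m n k i j) := by
  refine swLoop.induct m n k
    (fun mat h => InvB m n k mat →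
      Dims m n (swLoop m n k mat h) ∧
      (∀ i j : Nat, getC (swLoop m n k mat h) i j = 1 ↔ ReachN m n k i j)) ?_ ?_
  · intro mat h hc ih inv
    obtain ⟨horig, hsound, hzo⟩ := inv
    obtain ⟨c1, c2, c3, c4, c5, c6, c7⟩ := swInv_sweep m n k mat
    rw [swLoop, dif_pos hc]
    apply ih
    refine ⟨c2 0 0 horig, c7 h (ReachN m n k) (hr_reach hm hn) hsound, ?_⟩
    intro i j
    rcases c3 h i j with he | h1
    · rw [he]; exact hzo i j
    · exact Or.inr h1
  · intro mat h hc inv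
    obtain ⟨horig, hsound, hzo⟩ := inv
    obtain ⟨c1, c2, c3, c4, c5, c6, c7⟩ := swInv_sweep m n k mat
    have hc' : (sweep m n k mat).2 = false := by
      cases hcc : (sweep m n k mat).2
      · rfl
      · exact absurd hcc hc
    obtain ⟨he, hcl⟩ := c6 hc'
    rw [swLoop, dif_neg hc, he]
    refine ⟨h, ?_⟩
    intro i j
    exact ⟨hsound i j,
      closed_marked_B hm hn mat horig hzo (fun i j hi hj => hcl i j ⟨hi, hj⟩) i j⟩

-- counting: sum of row counts = size of the marked set
lemma count_ite (l : List Int) :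
    l.count 1 = ∑ j ∈ Finset.range l.length, if l.getD j 0 = 1 then 1 else 0 := by
  induction l with
  | nil => simp
  | cons a l ih =>
      rw [List.count_cons, ih]
      simp only [List.length_cons, Finset.sum_range_succ', List.getD_cons_succ,
        List.getD_cons_zero]
      by_cases ha : a = 1 <;> simp [ha, add_comm]
  
lemma map_sum_getD (mat : List (List Int)) :
    (mat.map (fun r => r.count 1)).sum = ∑ i ∈ Finset.range mat.length, (mat.getD i []).count 1 := by
  induction mat with
  | nil => simp
  | cons r mat ih =>
      rw [List.map_cons, List.sum_cons, ih]
      simp only [List.length_cons, Finset.sum_range_succ', List.getD_cons_succ,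
        List.getD_cons_zero]
      ring

lemma count_marked (m n : Int) (mat : List (List Int)) (hd : Dims m n mat) :
    (mat.map (fun r => r.count 1)).sum = (markedF m n mat).card := by
  rw [map_sum_getD, markedF, Finset.card_filter, Finset.sum_product, hd.1]
  apply Finset.sum_congr rfl
  intro i hi
  have hil : i < mat.length := by rw [hd.1]; exact Finset.mem_range.mp hi
  have hrow : (mat.getD i []).length = n.toNat := by
    apply hd.2
    rw [List.getD_eq_getElem _ _ hil]
    exact List.getElem_mem hil
  rw [count_ite, hrow]
  apply Finset.sum_congr rfl
  intro j hj
  simp [getC]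

-- the freshly initialised matrix: only the origin is marked
lemma dims_rep (m n : Int) : Dims m n (List.replicate m.toNat (List.replicate n.toNat (0 : Int))) := by
  constructor
  · simp
  · intro r hr
    simp [List.eq_of_mem_replicate hr]

lemma getC_rep (m n : Int) (a b : Nat) :
    getC (List.replicate m.toNat (List.replicate n.toNat (0 : Int))) a b = 0 := by
  by_cases ha : a < m.toNat
  · have hrow : (List.replicate m.toNat (List.replicate n.toNat (0 : Int))).getD a [] =
        List.replicate n.toNat 0 := by
      rw [List.getD_eq_getElem _ _ (by simpa using ha)]
      simp
    rw [getC, hrow]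
    by_cases hb : b < n.toNat
    · rw [List.getD_eq_getElem _ _ (by simpa using hb)]
      simp
    · rw [List.getD_eq_default _ _ (by simpa using hb)]
  · have h0 : (List.replicate m.toNat (List.replicate n.toNat (0 : Int))).getD a [] = [] :=
      List.getD_eq_default _ _ (by simpa using ha)
    rw [getC, h0]
    simp

lemma getC_init (m n : Int) (hm : 1 ≤ m) (hn : 1 ≤ n) (i j : Nat) :
    getC (setC (List.replicate m.toNat (List.replicate n.toNat (0 : Int))) 0 0 1) i j = 1 ↔
      (i = 0 ∧ j = 0) := by
  rw [getC_setC_iff m n _ 0 0 (dims_rep m n) (by omega) (by omega) i j, getC_rep]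
  norm_num

lemma card_init (m n : Int) (hm : 1 ≤ m) (hn : 1 ≤ n) :
    (markedF m n (setC (List.replicate m.toNat (List.replicate n.toNat (0 : Int))) 0 0 1)).card
      = 1 := by
  have : markedF m n (setC (List.replicate m.toNat (List.replicate n.toNat (0 : Int))) 0 0 1) =
      {((0 : Nat), (0 : Nat))} := by
    ext p
    rw [mem_markedF' m n _ (dims_init m n), getC_init m n hm hn, Finset.mem_singleton,
      Prod.ext_iff]
  rw [this, Finset.card_singleton]

-- ===== VERDICT (by name: the statement is the Claim_ definition above) =====
theorem movingCount2_spec : Claim_equal_movingCount2 := by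
  intro m n k hdom hpre
  obtain ⟨hm, hn⟩ := hpre
  show movingCount2 m n k = movingCount2_alt m n k
  have horig1 : getC (setC (List.replicate m.toNat (List.replicate n.toNat (0 : Int))) 0 0 1) 0 0
      = 1 := (getC_init m n hm hn 0 0).mpr ⟨rfl, rfl⟩
  have hsound1 : ∀ i j : Nat,
      getC (setC (List.replicate m.toNat (List.replicate n.toNat (0 : Int))) 0 0 1) i j = 1 →
      ReachN m n k i j := by
    intro i j hij
    obtain ⟨rfl, rfl⟩ := (getC_init m n hm hn i j).mp hij
    exact ReachN.origin
  have hzo1 : ∀ i j : Nat,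
      getC (setC (List.replicate m.toNat (List.replicate n.toNat (0 : Int))) 0 0 1) i j = 0 ∨
      getC (setC (List.replicate m.toNat (List.replicate n.toNat (0 : Int))) 0 0 1) i j = 1 := by
    intro i j
    by_cases he : i = 0 ∧ j = 0
    · obtain ⟨rfl, rfl⟩ := he
      exact Or.inr horig1
    · left
      rw [getC_setC_ne _ 0 0 1 i j he]
      exact getC_rep m n i j
  have invA : InvA m n k (setC (List.replicate m.toNat (List.replicate n.toNat (0 : Int))) 0 0 1)
      [(0, 0)] 0 := by
    refine ⟨dims_init m n, horig1, hsound1, by simp, ?_, by simp, ?_, ?_⟩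
    · intro p hp
      rw [List.mem_singleton] at hp
      subst hp
      exact horig1
    · intro i j hmk hnotin d hdm hadm
      obtain ⟨rfl, rfl⟩ := (getC_init m n hm hn i j).mp hmk
      exact absurd (by simp) hnotin
    · rw [card_init m n hm hn]
      simp
  obtain ⟨matF, hdF, hiffA, heqA⟩ := bfs_master hm hn _ [(0, 0)] 0 (dims_init m n) invA
  obtain ⟨hdB, hiffB⟩ := sw_master hm hn _ (dims_init m n) ⟨horig1, hsound1, hzo1⟩
  have hset_eq : markedF m n
      (swLoop m n k (setC (List.replicate m.toNat (List.replicate n.toNat (0 : Int))) 0 0 1)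
        (dims_init m n)) = markedF m n matF := by
    ext p
    rw [mem_markedF' m n _ hdB, mem_markedF' m n _ hdF, hiffB p.1 p.2, hiffA p.1 p.2]
  calc movingCount2 m n k = ((markedF m n matF).card : Int) := heqA
    _ = ((markedF m n (swLoop m n k
          (setC (List.replicate m.toNat (List.replicate n.toNat (0 : Int))) 0 0 1)
          (dims_init m n))).card : Int) := by rw [hset_eq]
    _ = movingCount2_alt m n k := by
          simp only [movingCount2_alt]
          rw [← count_marked m n _ hdB, Nat.cast_list_sum, List.map_map]
          rfl
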